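-- pv_equiv track=rewrite | github.com/fzl194/CoreMasterKB | knowledge_mining/mining/parsers/__init__.py | _split_paragraphs
-- ===== SOURCE A (Python) =====
-- def _split_paragraphs(text: str) -> list[tuple[str, int, int]]:
--     """Split text by blank lines into paragraphs with line numbers."""
--     paragraphs: list[tuple[str, int, int]] = []
--     current_lines: list[str] = []
--     line_start: int | None = None
--     lines = text.split("\n")
--     for line_idx, line in enumerate(lines):
--         if line.strip() == "":
--             if current_lines:
--                 paragraphs.append(("\n".join(current_lines), line_start, line_idx))
--                 current_lines = []
--                 line_start = None
--         else:
--             if line_start is None: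
--                 line_start = line_idx
--             current_lines.append(line)
--     if current_lines:
--         paragraphs.append(("\n".join(current_lines), line_start, len(lines)))
--     return paragraphs
-- ===== SOURCE B (Python) =====
-- def _split_paragraphs(text: str) -> list[tuple[str, int, int]]:
--     """Split text by blank lines into paragraphs with line numbers."""
--     lines = text.split("\n")
--     n = len(lines)
--     paragraphs = []
--     i = 0
--     while i < n:
--         if lines[i].strip() == "":
--             i += 1
--         else:
--             j = i + 1
--             while j < n and lines[j].strip() != "":
--                 j += 1
--             paragraphs.append(("\n".join(lines[i:j]), i, j))
--             i = j
--     return paragraphs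
-- ===== Notes on version B (the rewrite author's own statement) =====
-- stated objective: alternative
-- what changed: Replaces the flush-on-blank accumulator state machine (current_lines/line_start carried through one enumerate loop plus a trailing flush) with a two-pointer index scan that skips blanks and emits each paragraph as one slice lines[i:j].
import Mathlib
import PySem

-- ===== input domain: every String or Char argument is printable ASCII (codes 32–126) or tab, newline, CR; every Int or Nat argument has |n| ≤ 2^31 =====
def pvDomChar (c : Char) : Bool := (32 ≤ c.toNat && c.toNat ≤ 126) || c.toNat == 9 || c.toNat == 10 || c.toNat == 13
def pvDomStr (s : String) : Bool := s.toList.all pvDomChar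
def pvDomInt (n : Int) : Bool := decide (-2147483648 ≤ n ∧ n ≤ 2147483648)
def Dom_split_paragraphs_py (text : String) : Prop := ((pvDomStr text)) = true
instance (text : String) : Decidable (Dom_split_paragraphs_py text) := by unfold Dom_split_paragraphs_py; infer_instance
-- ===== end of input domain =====

-- B replaces A's flush-on-blank accumulator state machine with a two-pointer index scan
-- that emits each paragraph as one slice; same algorithm class and cost, different structure.


-- ===== PORT A =====
-- loop body of A's 'for line_idx, line in enumerate(lines)' (state = (paragraphs, current_lines, line_start))
def pvStepA (s : List (String × Int × Int) × List String × Option Int) (p : Int × String) :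
    List (String × Int × Int) × List String × Option Int :=
  if PySem.Str.strip p.2 == "" then
    if s.2.1 ≠ [] then
      (s.1 ++ [(PySem.Str.join "\n" s.2.1, s.2.2.getD 0, p.1)], [], none)
    else s
  else
    (s.1, s.2.1 ++ [p.2], if s.2.2.isNone then some p.1 else s.2.2)

def split_paragraphs_py (text : String) : List (String × Int × Int) :=
  let lines := (PySem.Str.split? text "\n").getD []
  let st := (PySem.List.enumerate lines).foldl pvStepA ([], [], none)
  if st.2.1 ≠ [] then
    st.1 ++ [(PySem.Str.join "\n" st.2.1, st.2.2.getD 0, (lines.length : Int))]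
  else st.1

-- ===== PORT B =====
-- inner 'while j < n and lines[j].strip() != "": j += 1' (fuel only makes the loop total; with
-- fuel ≥ n - j it never runs out before the loop's own exit tests)
def pvScanB (lines : List String) : Nat → Nat → Nat
  | 0, j => j
  | fuel + 1, j =>
    match lines[j]? with
    | none => j
    | some l => if PySem.Str.strip l == "" then j else pvScanB lines fuel (j + 1)

-- outer 'while i < n' loop of B (same fuel device)
def pvBLoop (lines : List String) : Nat → Nat → List (String × Int × Int)
  | 0, _ => []
  | fuel + 1, i =>
    match lines[i]? with
    | none => []
    | some l =>
      if PySem.Str.strip l == "" then pvBLoop lines fuel (i + 1)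
      else
        let j := pvScanB lines lines.length (i + 1)
        (PySem.Str.join "\n" (PySem.List.slice lines (some (i : Int)) (some (j : Int))),
          (i : Int), (j : Int)) :: pvBLoop lines fuel j

def split_paragraphs_py_alt (text : String) : List (String × Int × Int) :=
  let lines := (PySem.Str.split? text "\n").getD []
  pvBLoop lines (lines.length + 1) 0

-- ===== PRECONDITION & SPEC =====
def Spec_split_paragraphs_py (text : String) (out : List (String × Int × Int)) : Prop := out = split_paragraphs_py_alt text
instance (text : String) (out : List (String × Int × Int)) : Decidable (Spec_split_paragraphs_py text out) := by unfold Spec_split_paragraphs_py; infer_instance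

-- ===== CLAIM (what is proved, stated in full; the proofs are below) =====
def Claim_equal_split_paragraphs_py : Prop := ∀ (text : String), Dom_split_paragraphs_py text → Spec_split_paragraphs_py text (split_paragraphs_py text)

-- ===== LEMMAS AND PROOFS =====

-- common reference function: paragraphs of ls, whose first line has index k
def pvG : List String → Int → List (String × Int × Int)
  | [], _ => []
  | l :: r, k =>
    if PySem.Str.strip l == "" then pvG r (k + 1)
    else
      let p := l :: r.takeWhile (fun x => !(PySem.Str.strip x == ""))
      (PySem.Str.join "\n" p, k, k + (p.length : Int)) ::
        pvG (r.dropWhile (fun x => !(PySem.Str.strip x == ""))) (k + (p.length : Int))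
termination_by ls _ => ls.length
decreasing_by
  all_goals
    have := List.length_dropWhile_le (fun x => !(PySem.Str.strip x == "")) r
    simp only [List.length_cons]
    omega

theorem pvTakeWhile_eq_take {α : Type} (p : α → Bool) (l : List α) :
    l.takeWhile p = l.take (l.takeWhile p).length :=
  List.prefix_iff_eq_take.mp (List.takeWhile_prefix p)

theorem pvDropWhile_eq_drop {α : Type} (p : α → Bool) (l : List α) :
    l.dropWhile p = l.drop (l.takeWhile p).length := by
  conv_lhs => rw [← List.drop_left (l₁ := List.takeWhile p l) (l₂ := List.dropWhile p l)]
  rw [List.takeWhile_append_dropWhile]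

theorem pvScanB_eq (lines : List String) (fuel j : Nat) (hf : lines.length ≤ fuel + j) :
    pvScanB lines fuel j
      = j + ((lines.drop j).takeWhile (fun x => !(PySem.Str.strip x == ""))).length := by
  induction fuel generalizing j with
  | zero =>
    have hle : lines.length ≤ j := by omega
    simp [pvScanB, List.drop_of_length_le hle]
  | succ fuel ih =>
    rw [pvScanB]
    cases hl : lines[j]? with
    | none =>
      have hle : lines.length ≤ j := by
        by_contra h
        simp [List.getElem?_eq_getElem (Nat.lt_of_not_le h)] at hl
      simp [List.drop_of_length_le hle]
    | some l =>
      dsimp only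
      obtain ⟨hj, hv⟩ := List.getElem?_eq_some_iff.mp hl
      rw [List.drop_eq_getElem_cons hj, hv]
      by_cases hb : PySem.Str.strip l == ""
      · simp [hb]
      · rw [if_neg hb, ih (j + 1) (by omega)]
        simp [hb]
        omega

theorem pvBLoop_eq (lines : List String) (fuel i : Nat) (hf : lines.length ≤ fuel + i) :
    pvBLoop lines fuel i = pvG (lines.drop i) (i : Int) := by
  induction fuel generalizing i with
  | zero =>
    have hle : lines.length ≤ i := by omega
    simp [pvBLoop, List.drop_of_length_le hle, pvG]
  | succ fuel ih =>
    rw [pvBLoop]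
    cases hl : lines[i]? with
    | none =>
      have hle : lines.length ≤ i := by
        by_contra h
        simp [List.getElem?_eq_getElem (Nat.lt_of_not_le h)] at hl
      simp [List.drop_of_length_le hle, pvG]
    | some l =>
      dsimp only
      obtain ⟨hi, hv⟩ := List.getElem?_eq_some_iff.mp hl
      by_cases hb : PySem.Str.strip l == ""
      · rw [if_pos hb, ih (i + 1) (by omega), List.drop_eq_getElem_cons hi, hv]
        rw [pvG]
        simp [hb]
      · rw [if_neg hb]
        have ht := pvScanB_eq lines lines.length (i + 1) (by omega)
        set t := ((lines.drop (i + 1)).takeWhile (fun x => !(PySem.Str.strip x == ""))).length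
          with htdef
        set j := pvScanB lines lines.length (i + 1) with hjdef
        have hj : j = i + 1 + t := ht
        rw [ih j (by omega)]
        conv_rhs => rw [List.drop_eq_getElem_cons hi, hv, pvG]
        rw [if_neg (by simpa using hb)]
        have hslice : PySem.List.slice lines (some (i : Int)) (some (j : Int)) =
            l :: (lines.drop (i + 1)).takeWhile (fun x => !(PySem.Str.strip x == "")) := by
          rw [PySem.List.slice_natCast, hj]
          rw [List.drop_eq_getElem_cons hi, hv]
          have h2 : i + 1 + t - i = t + 1 := by omega
          rw [h2, List.take_succ_cons]
          congr 1
          rw [htdef, ← pvTakeWhile_eq_take]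
        have hdrop : lines.drop j = (lines.drop (i + 1)).dropWhile (fun x => !(PySem.Str.strip x == "")) := by
          rw [pvDropWhile_eq_drop, ← htdef, List.drop_drop, hj]
          try congr 1
          try omega
        rw [hslice, hdrop, hj]
        push_cast
        simp only [List.length_cons, ← htdef]
        push_cast
        ring_nf

def pvPost (st : List (String × Int × Int) × List String × Option Int) (e : Int) :
    List (String × Int × Int) :=
  if st.2.1 ≠ [] then st.1 ++ [(PySem.Str.join "\n" st.2.1, st.2.2.getD 0, e)] else st.1

theorem pvFoldA_eq (ls : List String) :
    (∀ (k : Int) ps,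
      pvPost (List.foldl pvStepA (ps, [], none) (PySem.List.enumerate ls k)) (k + ls.length)
        = ps ++ pvG ls k) ∧
    (∀ (k : Int) ps cur s, cur ≠ [] →
      pvPost (List.foldl pvStepA (ps, cur, some s) (PySem.List.enumerate ls k)) (k + ls.length)
        = ps ++ (PySem.Str.join "\n" (cur ++ ls.takeWhile (fun x => !(PySem.Str.strip x == ""))), s,
            k + ((ls.takeWhile (fun x => !(PySem.Str.strip x == ""))).length : Int)) ::
          pvG (ls.dropWhile (fun x => !(PySem.Str.strip x == "")))
            (k + ((ls.takeWhile (fun x => !(PySem.Str.strip x == ""))).length : Int))) := by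
  induction ls with
  | nil =>
    constructor
    · intro k ps
      simp [pvPost, pvG, PySem.List.enumerate]
    · intro k ps cur s hc
      simp [pvPost, pvG, PySem.List.enumerate, hc]
  | cons l r ih =>
    constructor
    · intro k ps
      rw [PySem.List.enumerate_cons]
      simp only [List.foldl_cons]
      have he : k + ((l :: r).length : Int) = (k + 1) + (r.length : Int) := by
        simp only [List.length_cons]; push_cast; ring
      by_cases hb : PySem.Str.strip l == ""
      · have hstep : pvStepA (ps, [], none) (k, l) = (ps, [], none) := by
          simp [pvStepA, hb]
        rw [hstep, he, ih.1 (k + 1) ps]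
        conv_rhs => rw [pvG]
        simp [hb]
      · have hstep : pvStepA (ps, [], none) (k, l) = (ps, [l], some k) := by
          simp [pvStepA, hb]
        rw [hstep, he, ih.2 (k + 1) ps [l] k (by simp)]
        conv_rhs => rw [pvG]
        rw [if_neg (by simpa using hb)]
        simp only [List.singleton_append, List.length_cons]
        push_cast
        ring_nf
    · intro k ps cur s hc
      rw [PySem.List.enumerate_cons]
      simp only [List.foldl_cons]
      have he : k + ((l :: r).length : Int) = (k + 1) + (r.length : Int) := by
        simp only [List.length_cons]; push_cast; ring
      by_cases hb : PySem.Str.strip l == ""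
      · have hstep : pvStepA (ps, cur, some s) (k, l)
            = (ps ++ [(PySem.Str.join "\n" cur, s, k)], [], none) := by
          simp [pvStepA, hb, hc]
        rw [hstep, he, ih.1 (k + 1)]
        have htw : (l :: r).takeWhile (fun x => !(PySem.Str.strip x == "")) = [] := by
          simp [hb]
        have hdw : (l :: r).dropWhile (fun x => !(PySem.Str.strip x == "")) = l :: r := by
          simp [hb]
        rw [htw, hdw]
        conv_rhs => rw [pvG]
        simp [hb]
      · have hstep : pvStepA (ps, cur, some s) (k, l) = (ps, cur ++ [l], some s) := by
          simp [pvStepA, hb]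
        rw [hstep, he, ih.2 (k + 1) ps (cur ++ [l]) s (by simp)]
        have htw : (l :: r).takeWhile (fun x => !(PySem.Str.strip x == ""))
            = l :: r.takeWhile (fun x => !(PySem.Str.strip x == "")) := by
          simp [hb]
        have hdw : (l :: r).dropWhile (fun x => !(PySem.Str.strip x == ""))
            = r.dropWhile (fun x => !(PySem.Str.strip x == "")) := by
          simp [hb]
        rw [htw, hdw]
        simp only [List.append_assoc, List.singleton_append, List.length_cons]
        push_cast
        ring_nf

-- ===== VERDICT (by name: the statement is the Claim_ definition above) =====
theorem split_paragraphs_py_spec : Claim_equal_split_paragraphs_py := by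
  intro text _
  show split_paragraphs_py text = split_paragraphs_py_alt text
  unfold split_paragraphs_py split_paragraphs_py_alt
  have hA := (pvFoldA_eq ((PySem.Str.split? text "\n").getD [])).1 0 []
  simp only [pvPost, zero_add] at hA
  rw [pvBLoop_eq _ _ 0 (by omega)]
  simpa using hA
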